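-- pv_equiv track=rewrite | github.com/chadfraser/AdventOfCode2018 | 18-SettlersOfTheNorthPole.py | extrapolate_and_get_lumber_value
-- ===== SOURCE A (Python) =====
-- from collections import Counter
--
-- def get_lumber_value(landscape):
--     lumber_counter = Counter([character for sublist in landscape for character in sublist])
--     return lumber_counter["|"] * lumber_counter["#"]
--
-- def get_sum_of_adjacent_tiles(landscape, x, y):
--     open_acre_count = tree_count = lumberyard_count = 0
--     for y_value in range(-1, 2):
--         for x_value in range(-1, 2):
--             if not 0 <= y + y_value < len(landscape) or not 0 <= x + x_value < len(landscape[y_value]):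
--                 continue
--             if x_value == y_value == 0:
--                 continue
--             try:
--                 value = landscape[y + y_value][x + x_value]
--                 if value == ".":
--                     open_acre_count += 1
--                 elif value == "|":
--                     tree_count += 1
--                 elif value == "#":
--                     lumberyard_count += 1
--             except IndexError:
--                 pass
--     return open_acre_count, tree_count, lumberyard_count
--
-- def alter_open_acre(tree_count):
--     if tree_count >= 3:
--         return "|"
--     return "."
--
-- def alter_tree(lumberyard_count):
--     if lumberyard_count >= 3:
--         return "#"
--     return "|"
--
-- def alter_lumberyard(tree_count, lumberyard_count):
--     if lumberyard_count >= 1 and tree_count >= 1: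
--         return "#"
--     return "."
--
-- def alter_landscape(landscape):
--     new_landscape = []
--     for y_index, sublist in enumerate(landscape):
--         temp_sublist = []
--         for x_index, value in enumerate(sublist):
--             open_acre_count, tree_count, lumberyard_count = get_sum_of_adjacent_tiles(landscape, x_index, y_index)
--             if value == ".":
--                 temp_sublist.append(alter_open_acre(tree_count))
--             elif value == "|":
--                 temp_sublist.append(alter_tree(lumberyard_count))
--             else:
--                 temp_sublist.append(alter_lumberyard(tree_count, lumberyard_count))
--         new_landscape.append(temp_sublist)
--     return new_landscape
--
-- def extrapolate_and_get_lumber_value(landscape, base_time, repetition_time, final_time):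
--     period_length = repetition_time - base_time
--     remaining_time = final_time - repetition_time
--     required_time_at_end_of_last_period = remaining_time % period_length
--     for __ in range(required_time_at_end_of_last_period):
--         landscape = alter_landscape(landscape)
--
--     lumber_value = get_lumber_value(landscape)
--     return lumber_value
-- ===== SOURCE B (Python) =====
-- def _window_counts(row, ch):
--     n = len(row)
--     return [sum(1 for c in (i - 1, i, i + 1) if 0 <= c < n and row[c] == ch)
--             for i in range(n)]
--
--
-- def _step(grid):
--     h = len(grid)
--     tree_rows = [_window_counts(row, "|") for row in grid]
--     yard_rows = [_window_counts(row, "#") for row in grid]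
--     new_grid = []
--     for y, row in enumerate(grid):
--         new_row = []
--         for x, value in enumerate(row):
--             trees = sum(tree_rows[r][x] for r in (y - 1, y, y + 1) if 0 <= r < h)
--             yards = sum(yard_rows[r][x] for r in (y - 1, y, y + 1) if 0 <= r < h)
--             if value == "|":
--                 trees -= 1
--             elif value == "#":
--                 yards -= 1
--             if value == ".":
--                 new_row.append("|" if trees >= 3 else ".")
--             elif value == "|":
--                 new_row.append("#" if yards >= 3 else "|")
--             else:
--                 new_row.append("#" if yards >= 1 and trees >= 1 else ".")
--         new_grid.append(new_row)
--     return new_grid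
--
--
-- def extrapolate_and_get_lumber_value(landscape, base_time, repetition_time, final_time):
--     period_length = repetition_time - base_time
--     steps = (final_time - repetition_time) % period_length
--     grid = landscape
--     for _ in range(steps):
--         grid = _step(grid)
--     trees = sum(row.count("|") for row in grid)
--     yards = sum(row.count("#") for row in grid)
--     return trees * yards
-- ===== Notes on version B (the rewrite author's own statement) =====
-- stated objective: alternative
-- what changed: One automaton step is re-decomposed as two passes: precompute per-row sliding-window counts of '|' and '#', then combine three row windows and subtract the centre cell, replacing A's per-cell 3x3 neighbour probing with bound checks and try/except; the lumber value is a sum of per-row counts instead of a Counter over the flattened grid.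
-- outside the precondition, e.g. on extrapolate_and_get_lumber_value([['.'], ['|', '|']], 0, 2, 3): A returns 0, B raises IndexError
import Mathlib
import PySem

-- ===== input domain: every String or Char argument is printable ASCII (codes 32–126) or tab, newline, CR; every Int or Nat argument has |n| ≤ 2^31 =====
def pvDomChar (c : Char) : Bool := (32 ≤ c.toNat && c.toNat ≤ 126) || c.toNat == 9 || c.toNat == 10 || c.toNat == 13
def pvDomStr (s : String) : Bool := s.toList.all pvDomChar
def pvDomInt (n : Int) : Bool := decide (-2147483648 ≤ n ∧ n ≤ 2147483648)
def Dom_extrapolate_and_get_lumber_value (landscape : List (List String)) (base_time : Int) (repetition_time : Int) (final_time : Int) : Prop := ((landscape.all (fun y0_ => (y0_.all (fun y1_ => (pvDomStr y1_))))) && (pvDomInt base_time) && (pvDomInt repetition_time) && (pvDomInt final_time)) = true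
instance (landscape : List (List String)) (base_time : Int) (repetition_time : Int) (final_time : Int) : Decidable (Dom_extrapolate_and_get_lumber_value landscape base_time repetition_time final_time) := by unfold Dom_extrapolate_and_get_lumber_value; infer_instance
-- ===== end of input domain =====

-- B replaces A's per-cell 9-neighbour probing (with its try/except and fixed-row bound) by a
-- precomputed pass of per-row sliding-window counts combined vertically; same return value on
-- the stated domain (no speed claim). Neither version mutates its argument.

-- ===== PORT A =====

-- get_lumber_value: Counter over the flattened cell list, then counter["|"] * counter["#"]
def pvGetLumberValue (landscape : List (List String)) : Int :=
  let chars := landscape.flatMap (fun sublist => sublist)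
  let lumber_counter := PySem.Dict.counter chars
  (lumber_counter.getD "|" 0) * (lumber_counter.getD "#" 0)

-- one (y_value, x_value) step of get_sum_of_adjacent_tiles's double loop.
-- `landscape[y_value]` is ported with pyGetD default []: in A that lookup is reached only after
-- `0 <= y + y_value < len(landscape)` held, which (with y ≥ 0 as A calls it) forces y_value ∈ {-1,0,1}
-- to be a valid python index, so the default is unreachable from the entry point.
def pvAdjInner (landscape : List (List String)) (x y yv : Int)
    (acc : Int × Int × Int) (xv : Int) : Int × Int × Int :=
  if ¬(0 ≤ y + yv ∧ y + yv < (landscape.length : Int)) ∨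
     ¬(0 ≤ x + xv ∧ x + xv < ((PySem.List.pyGetD landscape yv []).length : Int)) then acc
  else if xv = 0 ∧ yv = 0 then acc
  else
    -- value = landscape[y + y_value][x + x_value]; `except IndexError: pass` keeps acc on none
    match PySem.List.pyGet? landscape (y + yv) with
    | none => acc
    | some row =>
      match PySem.List.pyGet? row (x + xv) with
      | none => acc
      | some value =>
        if value = "." then (acc.1 + 1, acc.2.1, acc.2.2)
        else if value = "|" then (acc.1, acc.2.1 + 1, acc.2.2)
        else if value = "#" then (acc.1, acc.2.1, acc.2.2 + 1)
        else acc

def pvGetSumAdj (landscape : List (List String)) (x y : Int) : Int × Int × Int :=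
  (PySem.List.pyRange (-1) 2 1).foldl (fun acc yv =>
    (PySem.List.pyRange (-1) 2 1).foldl (pvAdjInner landscape x y yv) acc) (0, 0, 0)

def pvAlterOpenAcre (tree_count : Int) : String :=
  if tree_count ≥ 3 then "|" else "."

def pvAlterTree (lumberyard_count : Int) : String :=
  if lumberyard_count ≥ 3 then "#" else "|"

def pvAlterLumberyard (tree_count lumberyard_count : Int) : String :=
  if lumberyard_count ≥ 1 ∧ tree_count ≥ 1 then "#" else "."

def pvAlterLandscape (landscape : List (List String)) : List (List String) :=
  (PySem.List.enumerate landscape 0).foldl (fun new_landscape p =>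
    new_landscape ++ [(PySem.List.enumerate p.2 0).foldl (fun temp_sublist q =>
      let counts := pvGetSumAdj landscape q.1 p.1
      temp_sublist ++ [if q.2 = "." then pvAlterOpenAcre counts.2.1
                       else if q.2 = "|" then pvAlterTree counts.2.2
                       else pvAlterLumberyard counts.2.1 counts.2.2]) []]) []

def extrapolate_and_get_lumber_value (landscape : List (List String)) (base_time : Int) (repetition_time : Int) (final_time : Int) : Int :=
  let period_length := repetition_time - base_time
  let remaining_time := final_time - repetition_time
  let required_time_at_end_of_last_period := PySem.Int.mod remaining_time period_length
  let land := (List.range required_time_at_end_of_last_period.toNat).foldl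
    (fun g _ => pvAlterLandscape g) landscape
  pvGetLumberValue land

-- ===== PORT B =====

-- _window_counts(row, ch): per-column count of ch in columns i-1, i, i+1 of this row
def pvWindowCounts (row : List String) (ch : String) : List Int :=
  let n := (row.length : Int)
  (PySem.List.pyRange 0 n 1).map (fun i =>
    [i - 1, i, i + 1].foldl (fun s c =>
      if 0 ≤ c ∧ c < n ∧ PySem.List.pyGetD row c "" = ch then s + 1 else s) 0)

-- _step(grid): tree_rows[r][x] / yard_rows[r][x] are ported with pyGetD defaults; under
-- Pre_ (rectangular grid) the indices are always in range, so the defaults are unreachable.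
def pvStep (grid : List (List String)) : List (List String) :=
  let h := (grid.length : Int)
  let tree_rows := grid.map (fun row => pvWindowCounts row "|")
  let yard_rows := grid.map (fun row => pvWindowCounts row "#")
  (PySem.List.enumerate grid 0).foldl (fun new_grid p =>
    new_grid ++ [(PySem.List.enumerate p.2 0).foldl (fun new_row q =>
      let trees0 := [p.1 - 1, p.1, p.1 + 1].foldl (fun s r =>
        if 0 ≤ r ∧ r < h then s + PySem.List.pyGetD (PySem.List.pyGetD tree_rows r []) q.1 0 else s) 0
      let yards0 := [p.1 - 1, p.1, p.1 + 1].foldl (fun s r =>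
        if 0 ≤ r ∧ r < h then s + PySem.List.pyGetD (PySem.List.pyGetD yard_rows r []) q.1 0 else s) 0
      let trees := if q.2 = "|" then trees0 - 1 else trees0
      let yards := if ¬(q.2 = "|") ∧ q.2 = "#" then yards0 - 1 else yards0
      new_row ++ [if q.2 = "." then (if trees ≥ 3 then "|" else ".")
                  else if q.2 = "|" then (if yards ≥ 3 then "#" else "|")
                  else (if yards ≥ 1 ∧ trees ≥ 1 then "#" else ".")]) []]) []

def extrapolate_and_get_lumber_value_alt (landscape : List (List String)) (base_time : Int) (repetition_time : Int) (final_time : Int) : Int :=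
  let period_length := repetition_time - base_time
  let steps := PySem.Int.mod (final_time - repetition_time) period_length
  let grid := (List.range steps.toNat).foldl (fun g _ => pvStep g) landscape
  let trees := (grid.map (fun row => (PySem.List.count row "|" : Int))).sum
  let yards := (grid.map (fun row => (PySem.List.count row "#" : Int))).sum
  trees * yards

-- ===== PRECONDITION & SPEC =====

-- Pre_ excludes (a) repetition_time = base_time, where A raises ZeroDivisionError (and so does B),
-- and (b) ragged grids (rows of unequal length) when at least one simulation step runs: those are
-- outside the task's natural domain (AoC grids are rectangular); A happens to return a value there
-- (its bound check reads fixed rows landscape[-1]/[0]/[1] and swallows IndexError) while B raises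
-- IndexError, so they are excluded rather than matched.
def Pre_extrapolate_and_get_lumber_value (landscape : List (List String)) (base_time : Int) (repetition_time : Int) (final_time : Int) : Prop :=
  repetition_time - base_time ≠ 0 ∧
    ((landscape.all (fun row => row.length == (landscape.headD []).length)) = true ∨
      PySem.Int.mod (final_time - repetition_time) (repetition_time - base_time) ≤ 0)

instance (landscape : List (List String)) (base_time : Int) (repetition_time : Int) (final_time : Int) : Decidable (Pre_extrapolate_and_get_lumber_value landscape base_time repetition_time final_time) := by
  unfold Pre_extrapolate_and_get_lumber_value; infer_instance

def pvWitness_extrapolate_and_get_lumber_value : List (List String) × Int × Int × Int :=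
  ([[".", "|"], ["#", "."]], 0, 1, 3)

def Spec_extrapolate_and_get_lumber_value (landscape : List (List String)) (base_time : Int) (repetition_time : Int) (final_time : Int) (out : Int) : Prop := out = extrapolate_and_get_lumber_value_alt landscape base_time repetition_time final_time
instance (landscape : List (List String)) (base_time : Int) (repetition_time : Int) (final_time : Int) (out : Int) : Decidable (Spec_extrapolate_and_get_lumber_value landscape base_time repetition_time final_time out) := by unfold Spec_extrapolate_and_get_lumber_value; infer_instance

-- ===== CLAIM (what is proved, stated in full; the proofs are below) =====
def Claim_equal_extrapolate_and_get_lumber_value : Prop := ∀ (landscape : List (List String)) (base_time : Int) (repetition_time : Int) (final_time : Int), Dom_extrapolate_and_get_lumber_value landscape base_time repetition_time final_time → Pre_extrapolate_and_get_lumber_value landscape base_time repetition_time final_time → Spec_extrapolate_and_get_lumber_value landscape base_time repetition_time final_time (extrapolate_and_get_lumber_value landscape base_time repetition_time final_time)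

-- ===== LEMMAS AND PROOFS =====

def pvH (g : List (List String)) : Int := (g.length : Int)
def pvW (g : List (List String)) : Int := ((g.headD []).length : Int)
def pvRect (g : List (List String)) : Prop := ∀ row ∈ g, (row.length : Int) = pvW g

def pvInd (g : List (List String)) (yy xx : Int) (v : String) : Int :=
  if 0 ≤ yy ∧ yy < pvH g ∧ 0 ≤ xx ∧ xx < pvW g ∧
     PySem.List.pyGetD (PySem.List.pyGetD g yy []) xx "" = v then 1 else 0

def pvDelta (g : List (List String)) (y x yv xv : Int) (v : String) : Int :=
  if xv = 0 ∧ yv = 0 then 0 else pvInd g (y + yv) (x + xv) v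

lemma pvFixedRow_len (g : List (List String)) (y yv : Int) (hr : pvRect g) (_hy : 0 ≤ y)
    (hyv : yv = -1 ∨ yv = 0 ∨ yv = 1) (hb : 0 ≤ y + yv ∧ y + yv < pvH g) :
    ((PySem.List.pyGetD g yv []).length : Int) = pvW g := by
  have hne : g ≠ [] := by
    intro h; subst h; simp [pvH] at hb; omega
  rcases hyv with rfl | rfl | rfl
  · rw [PySem.List.pyGetD_neg_one g [] hne]
    exact hr _ (List.getLast_mem hne)
  · rw [PySem.List.pyGetD_eq_getElem g [] le_rfl (by simp [pvH] at hb ⊢; omega)]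
    exact hr _ (List.getElem_mem _)
  · rw [PySem.List.pyGetD_eq_getElem g [] (by omega) (by simp [pvH] at hb ⊢; omega)]
    exact hr _ (List.getElem_mem _)

lemma pvAdjInner_add (g : List (List String)) (x y yv xv : Int) (acc : Int × Int × Int)
    (hr : pvRect g) (hy : 0 ≤ y ∧ y < pvH g) (_hx : 0 ≤ x ∧ x < pvW g)
    (hyv : yv = -1 ∨ yv = 0 ∨ yv = 1) :
    pvAdjInner g x y yv acc xv =
      (acc.1 + pvDelta g y x yv xv ".", acc.2.1 + pvDelta g y x yv xv "|",
       acc.2.2 + pvDelta g y x yv xv "#") := by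
  by_cases hb : 0 ≤ y + yv ∧ y + yv < (g.length : Int)
  · have hlen := pvFixedRow_len g y yv hr hy.1 hyv hb
    by_cases hbx : 0 ≤ x + xv ∧ x + xv < pvW g
    · have hrow := PySem.List.pyGet?_eq_some_getElem g hb.1 hb.2
      have hrowD := PySem.List.pyGetD_eq_getElem g [] hb.1 hb.2
      have hrl : ((g[(y + yv).toNat]'(by omega)).length : Int) = pvW g :=
        hr _ (List.getElem_mem _)
      have hcell := PySem.List.pyGet?_eq_some_getElem (g[(y + yv).toNat]'(by omega)) hbx.1
        (by rw [hrl]; exact hbx.2)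
      have hcellD := PySem.List.pyGetD_eq_getElem (g[(y + yv).toNat]'(by omega)) "" hbx.1
        (by rw [hrl]; exact hbx.2)
      unfold pvAdjInner pvDelta pvInd
      rw [hrow]; dsimp only
      rw [hcell]; dsimp only
      have hbC : ¬(¬(0 ≤ y + yv ∧ y + yv < (g.length : Int)) ∨
          ¬(0 ≤ x + xv ∧ x + xv < ((PySem.List.pyGetD g yv []).length : Int))) := by
        rw [hlen]; push Not; exact ⟨hb, hbx⟩
      rw [if_neg hbC]
      simp only [hrowD, hcellD]
      by_cases hc : xv = 0 ∧ yv = 0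
      · simp [hc]
      · have hball : (0 ≤ y + yv ∧ y + yv < pvH g ∧ 0 ≤ x + xv ∧ x + xv < pvW g) :=
          ⟨hb.1, by simpa [pvH] using hb.2, hbx⟩
        by_cases h1 : (g[(y + yv).toNat]'(by omega))[(x + xv).toNat]'(by
            have h := hrl; have h2 := hbx; omega) = "."
        · simp [hc, h1, hball.1, hball.2.1, hball.2.2.1, hball.2.2.2]
        · by_cases h2 : (g[(y + yv).toNat]'(by omega))[(x + xv).toNat]'(by
              have h := hrl; have h2 := hbx; omega) = "|"
          · simp [hc, h2, hball.1, hball.2.1, hball.2.2.1, hball.2.2.2]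
          · by_cases h3 : (g[(y + yv).toNat]'(by omega))[(x + xv).toNat]'(by
                have h := hrl; have h2 := hbx; omega) = "#"
            · simp [hc, h3, hball.1, hball.2.1, hball.2.2.1, hball.2.2.2]
            · simp [hc, h1, h2, h3, hball.1, hball.2.1, hball.2.2.1, hball.2.2.2]
    · -- x out of bounds: skip, indicators 0
      have hno : ∀ v, pvInd g (y + yv) (x + xv) v = 0 := by
        intro v; unfold pvInd; rw [if_neg]; intro h; exact hbx ⟨h.2.2.1, h.2.2.2.1⟩
      unfold pvAdjInner
      rw [hlen]
      have hcond : (¬(0 ≤ y + yv ∧ y + yv < (g.length : Int)) ∨ ¬(0 ≤ x + xv ∧ x + xv < pvW g)) := by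
        right; exact hbx
      simp [pvDelta, hno, hbx]
  · have hno : ∀ v, pvInd g (y + yv) (x + xv) v = 0 := by
      intro v; unfold pvInd; rw [if_neg]; intro h
      exact hb ⟨h.1, by simpa [pvH] using h.2.1⟩
    unfold pvAdjInner
    simp [pvDelta, hb, hno]

def pvSum9 (g : List (List String)) (y x : Int) (v : String) : Int :=
  pvInd g (y - 1) (x - 1) v + pvInd g (y - 1) x v + pvInd g (y - 1) (x + 1) v +
  pvInd g y (x - 1) v + pvInd g y x v + pvInd g y (x + 1) v +
  pvInd g (y + 1) (x - 1) v + pvInd g (y + 1) x v + pvInd g (y + 1) (x + 1) v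

lemma pvGetSumAdj_eq (g : List (List String)) (x y : Int) (hr : pvRect g)
    (hy : 0 ≤ y ∧ y < pvH g) (hx : 0 ≤ x ∧ x < pvW g) :
    (pvGetSumAdj g x y).2.1 = pvSum9 g y x "|" - pvInd g y x "|" ∧
    (pvGetSumAdj g x y).2.2 = pvSum9 g y x "#" - pvInd g y x "#" := by
  have E1 := fun (acc : Int × Int × Int) (xv : Int) =>
    pvAdjInner_add g x y (-1) xv acc hr hy hx (by norm_num)
  have E2 := fun (acc : Int × Int × Int) (xv : Int) =>
    pvAdjInner_add g x y 0 xv acc hr hy hx (by norm_num)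
  have E3 := fun (acc : Int × Int × Int) (xv : Int) =>
    pvAdjInner_add g x y 1 xv acc hr hy hx (by norm_num)
  unfold pvGetSumAdj
  rw [show PySem.List.pyRange (-1) 2 1 = [-1, 0, 1] from by decide]
  simp only [List.foldl, E1, E2, E3]
  unfold pvDelta pvSum9
  norm_num
  rw [show y + -1 = y - 1 from by ring, show x + -1 = x - 1 from by ring]
  constructor <;> omega

lemma pvWindow_at (g : List (List String)) (r x : Int) (v : String) (hr : pvRect g)
    (hb : 0 ≤ r ∧ r < pvH g) (hx : 0 ≤ x ∧ x < pvW g) :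
    PySem.List.pyGetD (PySem.List.pyGetD (g.map (fun row => pvWindowCounts row v)) r []) x 0 =
      pvInd g r (x - 1) v + pvInd g r x v + pvInd g r (x + 1) v := by
  have hbH : r < (g.length : Int) := by simpa [pvH] using hb.2
  have hrow : PySem.List.pyGetD (g.map (fun row => pvWindowCounts row v)) r [] =
      pvWindowCounts (g[r.toNat]'(by omega)) v := by
    rw [PySem.List.pyGetD_eq_getElem _ [] hb.1 (by simpa using hbH)]
    simp
  have hrl : ((g[r.toNat]'(by omega)).length : Int) = pvW g := hr _ (List.getElem_mem _)
  rw [hrow]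
  unfold pvWindowCounts
  simp only []
  rw [PySem.List.pyGetD_map_pyRange_of_nonneg _ _ _ _ hx.1 (by omega)]
  have hgD : PySem.List.pyGetD g r [] = g[r.toNat]'(by omega) :=
    PySem.List.pyGetD_eq_getElem g [] hb.1 hbH
  have hsplit : ∀ (s : Int) (c : Prop) [Decidable c], (if c then s + 1 else s) = s + (if c then (1:Int) else 0) := by
    intro s c _; split <;> ring
  simp only [List.foldl, hsplit]
  unfold pvInd
  rw [hrl, hgD]
  have hs : ∀ c : Int, (if 0 ≤ c ∧ c < pvW g ∧ PySem.List.pyGetD (g[r.toNat]'(by omega)) c "" = v then (1:Int) else 0) =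
      (if 0 ≤ r ∧ r < pvH g ∧ 0 ≤ c ∧ c < pvW g ∧ PySem.List.pyGetD (g[r.toNat]'(by omega)) c "" = v then (1:Int) else 0) := by
    intro c
    by_cases hc : 0 ≤ c ∧ c < pvW g ∧ PySem.List.pyGetD (g[r.toNat]'(by omega)) c "" = v
    · rw [if_pos hc, if_pos ⟨hb.1, hb.2, hc⟩]
    · rw [if_neg hc, if_neg (by intro h; exact hc h.2.2)]
  rw [hs (x-1), hs x, hs (x+1)]
  omega

lemma pvStepCounts_eq (g : List (List String)) (x y : Int) (hr : pvRect g)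
    (hy : 0 ≤ y ∧ y < pvH g) (hx : 0 ≤ x ∧ x < pvW g) (v : String) :
    [y - 1, y, y + 1].foldl (fun s r =>
        if 0 ≤ r ∧ r < (g.length : Int) then
          s + PySem.List.pyGetD (PySem.List.pyGetD (g.map (fun row => pvWindowCounts row v)) r []) x 0
        else s) 0 = pvSum9 g y x v := by
  have hno : ∀ (r c : Int), ¬(0 ≤ r ∧ r < (g.length : Int)) → pvInd g r c v = 0 := by
    intro r c h
    unfold pvInd
    rw [if_neg]
    intro hcon
    exact h ⟨hcon.1, by simpa [pvH] using hcon.2.1⟩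
  simp only [List.foldl]
  unfold pvSum9
  by_cases h1 : 0 ≤ y - 1 ∧ y - 1 < (g.length : Int)
  · by_cases h3 : 0 ≤ y + 1 ∧ y + 1 < (g.length : Int)
    · rw [if_pos h3, if_pos (by exact ⟨hy.1, by simpa [pvH] using hy.2⟩ : 0 ≤ y ∧ y < (g.length : Int)), if_pos h1]
      rw [pvWindow_at g (y-1) x v hr (by simpa [pvH] using h1) hx,
          pvWindow_at g y x v hr hy hx,
          pvWindow_at g (y+1) x v hr (by simpa [pvH] using h3) hx]
      omega
    · rw [if_neg h3, if_pos (by exact ⟨hy.1, by simpa [pvH] using hy.2⟩ : 0 ≤ y ∧ y < (g.length : Int)), if_pos h1]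
      rw [pvWindow_at g (y-1) x v hr (by simpa [pvH] using h1) hx,
          pvWindow_at g y x v hr hy hx]
      have := hno (y+1) (x-1) h3; have := hno (y+1) x h3; have := hno (y+1) (x+1) h3
      omega
  · by_cases h3 : 0 ≤ y + 1 ∧ y + 1 < (g.length : Int)
    · rw [if_pos h3, if_pos (by exact ⟨hy.1, by simpa [pvH] using hy.2⟩ : 0 ≤ y ∧ y < (g.length : Int)), if_neg h1]
      rw [pvWindow_at g y x v hr hy hx,
          pvWindow_at g (y+1) x v hr (by simpa [pvH] using h3) hx]
      have := hno (y-1) (x-1) h1; have := hno (y-1) x h1; have := hno (y-1) (x+1) h1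
      omega
    · rw [if_neg h3, if_pos (by exact ⟨hy.1, by simpa [pvH] using hy.2⟩ : 0 ≤ y ∧ y < (g.length : Int)), if_neg h1]
      rw [pvWindow_at g y x v hr hy hx]
      have := hno (y-1) (x-1) h1; have := hno (y-1) x h1; have := hno (y-1) (x+1) h1
      have := hno (y+1) (x-1) h3; have := hno (y+1) x h3; have := hno (y+1) (x+1) h3
      omega

lemma pvAlter_eq_step (g : List (List String)) (hr : pvRect g) :
    pvAlterLandscape g = pvStep g := by
  unfold pvAlterLandscape pvStep
  simp only [PySem.List.foldl_append_singleton_eq_map, List.nil_append]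
  apply List.map_congr_left
  intro p hp
  obtain ⟨k, hk, rfl⟩ := (PySem.List.mem_enumerate_iff g 0 p).1 hp
  apply List.map_congr_left
  intro q hq
  obtain ⟨j, hj, rfl⟩ := (PySem.List.mem_enumerate_iff _ 0 q).1 hq
  simp only [zero_add]
  have hy : 0 ≤ (k : Int) ∧ (k : Int) < pvH g := by
    constructor
    · positivity
    · simp [pvH]; omega
  have hrowW : ((g[k]'hk).length : Int) = pvW g := hr _ (List.getElem_mem _)
  have hx : 0 ≤ (j : Int) ∧ (j : Int) < pvW g := by
    constructor
    · positivity
    · rw [← hrowW]; exact_mod_cast hj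
  have hA := pvGetSumAdj_eq g (j : Int) (k : Int) hr hy hx
  have hT := pvStepCounts_eq g (j : Int) (k : Int) hr hy hx "|"
  have hL := pvStepCounts_eq g (j : Int) (k : Int) hr hy hx "#"
  have hcell : PySem.List.pyGetD (PySem.List.pyGetD g (k : Int) []) (j : Int) "" = (g[k]'hk)[j]'hj := by
    rw [PySem.List.pyGetD_eq_getElem g [] hy.1 (by simpa [pvH] using hy.2)]
    rw [PySem.List.pyGetD_eq_getElem _ "" hx.1 (by simpa using (by rw [hrowW]; exact hx.2 : (j:Int) < ((g[k]'hk).length : Int)))]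
    simp
  have hctr : ∀ v : String, pvInd g (k : Int) (j : Int) v = if (g[k]'hk)[j]'hj = v then 1 else 0 := by
    intro v
    unfold pvInd
    rw [hcell]
    simp [hy.1, hy.2, hx.1, hx.2]
  simp only [hT, hL, hA.1, hA.2]
  by_cases h1 : (g[k]'hk)[j]'hj = "."
  · simp [h1, hctr, pvAlterOpenAcre]
  · by_cases h2 : (g[k]'hk)[j]'hj = "|"
    · simp [h2, hctr, pvAlterTree]
    · by_cases h3 : (g[k]'hk)[j]'hj = "#"
      · simp [h3, hctr, pvAlterLumberyard]
      · simp [h1, h2, h3, hctr, pvAlterLumberyard]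

lemma pvAlter_shape (g : List (List String)) :
    (pvAlterLandscape g).map List.length = g.map List.length := by
  unfold pvAlterLandscape
  simp only [PySem.List.foldl_append_singleton_eq_map, List.nil_append]
  rw [List.map_map]
  have h2 : ∀ p ∈ PySem.List.enumerate g 0,
      (List.length ∘ fun p : Int × List String =>
        (PySem.List.enumerate p.2 0).map (fun q =>
          let counts := pvGetSumAdj g q.1 p.1
          if q.2 = "." then pvAlterOpenAcre counts.2.1
          else if q.2 = "|" then pvAlterTree counts.2.2
          else pvAlterLumberyard counts.2.1 counts.2.2)) p = p.2.length := by
    intro p _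
    simp [PySem.List.length_enumerate]
  rw [List.map_congr_left h2]
  have := congrArg (List.map List.length) (PySem.List.map_snd_enumerate g 0)
  rw [List.map_map] at this
  exact this

lemma pvRect_alter (g : List (List String)) (hr : pvRect g) : pvRect (pvAlterLandscape g) := by
  have hs := pvAlter_shape g
  intro row hrow
  have h1 : row.length ∈ (pvAlterLandscape g).map List.length := List.mem_map_of_mem hrow
  rw [hs] at h1
  obtain ⟨row', hrow', hlen⟩ := List.mem_map.1 h1
  have hW : pvW (pvAlterLandscape g) = pvW g := by
    unfold pvW
    have hhead : ∀ (X Y : List (List String)), X.map List.length = Y.map List.length →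
        (X.headD []).length = (Y.headD []).length := by
      intro X Y h
      cases X <;> cases Y <;> simp_all
    exact_mod_cast hhead _ _ hs
  rw [hW, ← hr row' hrow', hlen]

lemma pvRect_iterA (g : List (List String)) (hr : pvRect g) (n : Nat) :
    pvRect ((List.range n).foldl (fun acc _ => pvAlterLandscape acc) g) := by
  induction n with
  | zero => simpa using hr
  | succ m ih =>
    rw [List.range_succ, List.foldl_append]
    exact pvRect_alter _ ih

lemma pvIter_eq (g : List (List String)) (hr : pvRect g) (n : Nat) :
    (List.range n).foldl (fun acc _ => pvAlterLandscape acc) g =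
    (List.range n).foldl (fun acc _ => pvStep acc) g := by
  induction n with
  | zero => simp
  | succ m ih =>
    rw [List.range_succ, List.foldl_append, List.foldl_append]
    simp only [List.foldl]
    rw [pvAlter_eq_step _ (pvRect_iterA g hr m), ih]

lemma pvRect_all (g : List (List String))
    (h : (g.all (fun row => row.length == (g.headD []).length)) = true) : pvRect g := by
  intro row hrow
  simp only [List.all_eq_true, beq_iff_eq] at h
  exact_mod_cast congrArg (Int.ofNat) (h row hrow)

lemma pvCount_eq (g : List (List String)) :
    pvGetLumberValue g =
      (g.map (fun row => (PySem.List.count row "|" : Int))).sum *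
      (g.map (fun row => (PySem.List.count row "#" : Int))).sum := by
  unfold pvGetLumberValue
  simp only []
  rw [PySem.Dict.getD_counter, PySem.Dict.getD_counter]
  simp [List.flatMap_def, List.count_flatten, PySem.List.count_eq]
  rfl

-- ===== VERDICT (by name: the statement is the Claim_ definition above) =====
theorem extrapolate_and_get_lumber_value_spec : Claim_equal_extrapolate_and_get_lumber_value := by
  intro landscape base_time repetition_time final_time _ hpre
  obtain ⟨hp, hcase⟩ := hpre
  unfold Spec_extrapolate_and_get_lumber_value
  unfold extrapolate_and_get_lumber_value extrapolate_and_get_lumber_value_alt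
  rcases hcase with hrect | hzero
  · have hr := pvRect_all _ hrect
    simp only []
    rw [pvIter_eq _ hr, pvCount_eq]
  · have h0 : (PySem.Int.mod (final_time - repetition_time) (repetition_time - base_time)).toNat = 0 := by
      omega
    simp only [h0]
    rw [pvCount_eq]
    simp
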